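-- pv_equiv track=rewrite | github.com/pabachmann/iterative-abcvoting | set_preferences.py | cmp_fishburn
-- ===== SOURCE A (Python) =====
-- def cmp_fishburn(preference:list[int], A:set, B:set) -> bool:
--     A_minus_B = A-B
--     B_minus_A = B-A
--     for a in A_minus_B:
--         for b in B:
--             comp = preference.index(b) - preference.index(a)
--             if comp < 0:
--                 return False
--     for a in A:
--         for b in B_minus_A:
--             comp = preference.index(b) - preference.index(a)
--             if comp < 0:
--                 return False
--     return True
-- ===== SOURCE B (Python) =====
-- def cmp_fishburn(preference: list[int], A: set, B: set) -> bool: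
--     # Build the rank table once (first occurrence wins, like list.index).
--     rank = {}
--     for i, x in enumerate(preference):
--         if x not in rank:
--             rank[x] = i
--     A_minus_B = A - B
--     B_minus_A = B - A
--     if A_minus_B and B and max(rank[a] for a in A_minus_B) > min(rank[b] for b in B):
--         return False
--     if A and B_minus_A and max(rank[a] for a in A) > min(rank[b] for b in B_minus_A):
--         return False
--     return True
-- ===== Notes on version B (the rewrite author's own statement) =====
-- stated objective: alternative
-- what changed: Replaces the two nested loops of repeated preference.index calls with a rank dictionary built once and a single max/min comparison per dominance condition, so each condition becomes one pass over the sets instead of a quadratic scan of preference per pair.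
-- outside the precondition, e.g. on cmp_fishburn([2, 1], {1}, {2, 5}): A returns False, B raises KeyError
import Mathlib
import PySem

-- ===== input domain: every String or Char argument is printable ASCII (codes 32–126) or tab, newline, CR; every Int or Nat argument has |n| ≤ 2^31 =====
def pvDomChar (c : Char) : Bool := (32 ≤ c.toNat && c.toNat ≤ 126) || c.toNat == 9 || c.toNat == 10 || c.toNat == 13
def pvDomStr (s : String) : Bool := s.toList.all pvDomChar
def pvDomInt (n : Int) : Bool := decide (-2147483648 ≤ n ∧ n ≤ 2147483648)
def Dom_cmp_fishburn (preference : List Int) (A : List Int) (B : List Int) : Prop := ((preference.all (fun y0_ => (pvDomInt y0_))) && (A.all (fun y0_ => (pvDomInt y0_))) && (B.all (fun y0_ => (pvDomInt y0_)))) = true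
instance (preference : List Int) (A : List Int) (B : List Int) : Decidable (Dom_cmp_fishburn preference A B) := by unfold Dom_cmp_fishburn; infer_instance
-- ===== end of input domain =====

-- B builds the rank table once and tests each dominance condition with one max/min
-- comparison instead of A's nested loops of repeated preference.index calls.


-- ===== PORT A =====
-- comp = preference.index(b) - preference.index(a); exact under Pre_ (both elements present,
-- so index? is some; the .getD 0 default is never used inside Pre_).
def cfComp (pref : List Int) (b a : Int) : Int :=
  (((PySem.List.index? pref b).getD 0 : Nat) : Int) - (((PySem.List.index? pref a).getD 0 : Nat) : Int)

-- 'for b in Bs: if comp < 0: return False'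
def cfInner (pref : List Int) (a : Int) (Bs : List Int) : Bool :=
  match Bs with
  | [] => true
  | b :: rest => if cfComp pref b a < 0 then false else cfInner pref a rest

-- 'for a in as_: for b in Bs: …'
def cfOuter (pref : List Int) (as_ : List Int) (Bs : List Int) : Bool :=
  match as_ with
  | [] => true
  | a :: rest => if cfInner pref a Bs then cfOuter pref rest Bs else false

def cmp_fishburn (preference : List Int) (A : List Int) (B : List Int) : Bool :=
  let A_minus_B := A.filter (fun x => !B.contains x)
  let B_minus_A := B.filter (fun x => !A.contains x)
  if cfOuter preference A_minus_B B then cfOuter preference A B_minus_A else false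

-- ===== PORT B =====
-- rank = {}; for i, x in enumerate(preference): if x not in rank: rank[x] = i
def cfRank (pref : List Int) : PySem.Dict Int Int :=
  (PySem.List.enumerate pref 0).foldl
    (fun d p => if d.contains p.2 then d else d.insert p.2 p.1) PySem.Dict.empty

-- max(rank[x] for x in xs) / min(rank[x] for x in xs) (only used on nonempty xs)
def cfMaxVal (rank : PySem.Dict Int Int) (xs : List Int) : Int :=
  match xs.map (fun x => rank.getD x 0) with
  | [] => 0
  | h :: t => t.foldl max h

def cfMinVal (rank : PySem.Dict Int Int) (xs : List Int) : Int :=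
  match xs.map (fun x => rank.getD x 0) with
  | [] => 0
  | h :: t => t.foldl min h

def cmp_fishburn_alt (preference : List Int) (A : List Int) (B : List Int) : Bool :=
  let rank := cfRank preference
  let A_minus_B := A.filter (fun x => !B.contains x)
  let B_minus_A := B.filter (fun x => !A.contains x)
  if !A_minus_B.isEmpty && !B.isEmpty &&
      cfMaxVal rank A_minus_B > cfMinVal rank B then false
  else if !A.isEmpty && !B_minus_A.isEmpty &&
      cfMaxVal rank A > cfMinVal rank B_minus_A then false
  else true

-- ===== PRECONDITION & SPEC =====
-- Pre_ excludes inputs with an element of A or B missing from preference (not a total ranking),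
-- except the degenerate cases (A or B empty, or A == B as sets) where neither program looks
-- anything up: on the excluded inputs A either raises ValueError or — depending on set hash
-- order — returns False before reaching the missing element, and B raises KeyError.
def Pre_cmp_fishburn (preference : List Int) (A : List Int) (B : List Int) : Prop :=
  A = [] ∨ B = [] ∨ ((∀ x ∈ A, x ∈ B) ∧ (∀ x ∈ B, x ∈ A)) ∨
    ((∀ x ∈ A, x ∈ preference) ∧ (∀ x ∈ B, x ∈ preference))
instance (preference : List Int) (A : List Int) (B : List Int) : Decidable (Pre_cmp_fishburn preference A B) := by unfold Pre_cmp_fishburn; infer_instance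

def pvWitness_cmp_fishburn : List Int × List Int × List Int := ([3, 1, 2], [1, 3], [2])

def Spec_cmp_fishburn (preference : List Int) (A : List Int) (B : List Int) (out : Bool) : Prop := out = cmp_fishburn_alt preference A B
instance (preference : List Int) (A : List Int) (B : List Int) (out : Bool) : Decidable (Spec_cmp_fishburn preference A B out) := by unfold Spec_cmp_fishburn; infer_instance

-- ===== CLAIM (what is proved, stated in full; the proofs are below) =====
def Claim_equal_cmp_fishburn : Prop := ∀ (preference : List Int) (A : List Int) (B : List Int), Dom_cmp_fishburn preference A B → Pre_cmp_fishburn preference A B → Spec_cmp_fishburn preference A B (cmp_fishburn preference A B)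

-- ===== LEMMAS AND PROOFS =====

-- the first-occurrence fold computes list.index
lemma cfRank_get?_aux (l : List Int) (s : Int) (d : PySem.Dict Int Int) (v : Int) :
    ((PySem.List.enumerate l s).foldl
        (fun d p => if d.contains p.2 then d else d.insert p.2 p.1) d).get? v =
      match d.get? v with
      | some w => some w
      | none =>
        match PySem.List.index? l v with
        | none => none
        | some k => some (s + (k : Int)) := by
  induction l generalizing s d with
  | nil =>
    cases h : d.get? v <;> simp [PySem.List.enumerate_nil, h]
  | cons x t ih =>
    rw [PySem.List.enumerate_cons, List.foldl_cons, ih]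
    by_cases hc : d.contains x
    · simp only [hc, if_pos]
      cases h : d.get? v with
      | some w => simp
      | none =>
        have hvx : v ≠ x := by
          intro he; subst he
          rw [PySem.Dict.contains_eq_isSome_get?] at hc
          simp [h] at hc
        rw [PySem.List.index?_cons_of_ne t (Ne.symm hvx)]
        cases PySem.List.index? t v <;> simp <;> omega
    · simp only [hc, if_neg, Bool.false_eq_true, not_false_iff]
      rw [PySem.Dict.get?_insert]
      by_cases hvx : v = x
      · subst hvx
        have h : d.get? v = none := by
          rw [PySem.Dict.contains_eq_isSome_get?] at hc
          cases h : d.get? v <;> simp [h] at hc ⊢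
        simp only [h]
        rw [PySem.List.index?_cons_self]
        simp
      · simp only [if_neg hvx]
        cases h : d.get? v with
        | some w => simp
        | none =>
          rw [PySem.List.index?_cons_of_ne t (Ne.symm hvx)]
          cases PySem.List.index? t v <;> simp <;> omega

-- under membership, rank.getD x 0 is list.index as an Int
lemma cfRank_getD (pref : List Int) (v : Int) (hv : v ∈ pref) :
    (cfRank pref).getD v 0 = (((PySem.List.index? pref v).getD 0 : Nat) : Int) := by
  have h := cfRank_get?_aux pref 0 PySem.Dict.empty v
  rw [PySem.Dict.get?_empty] at h
  obtain ⟨k, hk⟩ := Option.isSome_iff_exists.mp ((PySem.List.index?_isSome_iff pref v).mpr hv)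
  rw [PySem.Dict.getD_eq_get?_getD, cfRank, h, hk]
  simp

-- A's nested loops are a pure universally-quantified test
lemma cfInner_eq_all (pref : List Int) (a : Int) (Bs : List Int) :
    cfInner pref a Bs = Bs.all (fun b => !decide (cfComp pref b a < 0)) := by
  induction Bs with
  | nil => rfl
  | cons b rest ih => by_cases h : cfComp pref b a < 0 <;> simp [cfInner, h, ih]

lemma cfOuter_eq_true_iff (pref : List Int) (as_ Bs : List Int) :
    cfOuter pref as_ Bs = true ↔ ∀ a ∈ as_, ∀ b ∈ Bs, ¬ cfComp pref b a < 0 := by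
  have houter : cfOuter pref as_ Bs = as_.all (fun a => cfInner pref a Bs) := by
    induction as_ with
    | nil => rfl
    | cons a rest ih => by_cases h : cfInner pref a Bs <;> simp [cfOuter, h, ih]
  simp [houter, cfInner_eq_all, List.all_eq_true]

lemma foldl_max_le_iff (t : List Int) (h m : Int) :
    t.foldl max h ≤ m ↔ h ≤ m ∧ ∀ x ∈ t, x ≤ m := by
  induction t generalizing h with
  | nil => simp
  | cons x rest ih =>
    simp only [List.foldl_cons, ih, List.mem_cons]
    constructor
    · rintro ⟨hm, hall⟩
      exact ⟨le_trans (le_max_left _ _) hm,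
        fun y hy => hy.elim (fun he => he ▸ le_trans (le_max_right _ _) hm) (hall y)⟩
    · rintro ⟨hm, hall⟩
      exact ⟨max_le hm (hall x (Or.inl rfl)), fun y hy => hall y (Or.inr hy)⟩

lemma le_foldl_min_iff (t : List Int) (h m : Int) :
    m ≤ t.foldl min h ↔ m ≤ h ∧ ∀ x ∈ t, m ≤ x := by
  induction t generalizing h with
  | nil => simp
  | cons x rest ih =>
    simp only [List.foldl_cons, ih, List.mem_cons]
    constructor
    · rintro ⟨hm, hall⟩
      exact ⟨le_trans hm (min_le_left _ _),
        fun y hy => hy.elim (fun he => he ▸ le_trans hm (min_le_right _ _)) (hall y)⟩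
    · rintro ⟨hm, hall⟩
      exact ⟨le_min hm (hall x (Or.inl rfl)), fun y hy => hall y (Or.inr hy)⟩

-- the max/min guard is the same universally-quantified test, for nonempty lists
lemma max_le_min_iff (rank : PySem.Dict Int Int) (xs ys : List Int)
    (hx : xs ≠ []) (hy : ys ≠ []) :
    cfMaxVal rank xs ≤ cfMinVal rank ys ↔
      ∀ x ∈ xs, ∀ y ∈ ys, rank.getD x 0 ≤ rank.getD y 0 := by
  obtain ⟨x0, xt, rfl⟩ := List.exists_cons_of_ne_nil hx
  obtain ⟨y0, yt, rfl⟩ := List.exists_cons_of_ne_nil hy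
  simp only [cfMaxVal, cfMinVal, List.map_cons]
  rw [foldl_max_le_iff]
  constructor
  · rintro ⟨h0, hall⟩ x hx' y hy'
    have hx'' : rank.getD x 0 ≤ (yt.map (fun y => rank.getD y 0)).foldl min (rank.getD y0 0) := by
      rcases List.mem_cons.mp hx' with rfl | hm
      · exact h0
      · exact hall _ (List.mem_map_of_mem hm)
    rcases List.mem_cons.mp hy' with rfl | hm
    · exact le_trans hx'' ((le_foldl_min_iff _ _ _).mp le_rfl).1
    · exact le_trans hx'' (((le_foldl_min_iff _ _ _).mp le_rfl).2 _ (List.mem_map_of_mem hm))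
  · intro h
    have hmin : ∀ x ∈ x0 :: xt,
        rank.getD x 0 ≤ (yt.map (fun y => rank.getD y 0)).foldl min (rank.getD y0 0) := by
      intro x hx'
      rw [le_foldl_min_iff]
      refine ⟨h x hx' y0 List.mem_cons_self, ?_⟩
      intro z hz
      obtain ⟨y, hy, rfl⟩ := List.mem_map.mp hz
      exact h x hx' y (List.mem_cons_of_mem _ hy)
    refine ⟨hmin x0 List.mem_cons_self, ?_⟩
    intro z hz
    obtain ⟨x, hx', rfl⟩ := List.mem_map.mp hz
    exact hmin x (List.mem_cons_of_mem _ hx')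

lemma cfOuter_nil_right (pref : List Int) (l : List Int) : cfOuter pref l [] = true := by
  induction l with
  | nil => rfl
  | cons a rest ih => simp [cfOuter, cfInner, ih]

-- one dominance condition: A's loop pair over (as_, Bs) equals B's guard
lemma cond_eq (pref : List Int) (as_ Bs : List Int)
    (ha : ∀ x ∈ as_, x ∈ pref) (hb : ∀ x ∈ Bs, x ∈ pref) :
    cfOuter pref as_ Bs =
      !(!as_.isEmpty && !Bs.isEmpty && cfMaxVal (cfRank pref) as_ > cfMinVal (cfRank pref) Bs) := by
  rcases as_.eq_nil_or_concat with rfl | _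
  · simp [cfOuter]
  rcases Bs.eq_nil_or_concat with rfl | _
  · have : cfOuter pref as_ [] = true := by
      rw [cfOuter_eq_true_iff]; intro a _ b hb; cases hb
    simp [this]
  have hane : as_ ≠ [] := by rename_i h _; obtain ⟨_, _, rfl⟩ := h; simp
  have hbne : Bs ≠ [] := by rename_i h; obtain ⟨_, _, rfl⟩ := h; simp
  have key : cfOuter pref as_ Bs = true ↔
      ¬ cfMaxVal (cfRank pref) as_ > cfMinVal (cfRank pref) Bs := by
    rw [cfOuter_eq_true_iff, not_lt, max_le_min_iff _ _ _ hane hbne]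
    constructor
    · intro h x hx y hy
      rw [cfRank_getD pref x (ha x hx), cfRank_getD pref y (hb y hy)]
      have := h x hx y hy
      unfold cfComp at this
      omega
    · intro h a hA b hB
      have := h a hA b hB
      rw [cfRank_getD pref a (ha a hA), cfRank_getD pref b (hb b hB)] at this
      unfold cfComp
      omega
  by_cases hgt : cfMaxVal (cfRank pref) as_ > cfMinVal (cfRank pref) Bs
  · have hfalse : cfOuter pref as_ Bs = false := by
      cases hh : cfOuter pref as_ Bs
      · rfl
      · exact absurd (key.mp hh) (by simpa using hgt)
    simp [hfalse, hane, hbne, hgt]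
  · have htrue : cfOuter pref as_ Bs = true := key.mpr hgt
    simp [htrue, hgt]

-- ===== VERDICT (by name: the statement is the Claim_ definition above) =====
theorem cmp_fishburn_spec : Claim_equal_cmp_fishburn := by
  intro pref A B _ hpre
  unfold Spec_cmp_fishburn
  rcases hpre with rfl | rfl | ⟨hAB, hBA⟩ | ⟨hA, hB⟩
  · simp [cmp_fishburn, cmp_fishburn_alt, cfOuter]
  · simp [cmp_fishburn, cmp_fishburn_alt, cfOuter_nil_right]
  · have h1 : A.filter (fun x => !B.contains x) = [] := by
      rw [List.filter_eq_nil_iff]; intro x hx; simpa using hAB x hx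
    have h2 : B.filter (fun x => !A.contains x) = [] := by
      rw [List.filter_eq_nil_iff]; intro x hx; simpa using hBA x hx
    simp only [cmp_fishburn, cmp_fishburn_alt, h1, h2]
    simp [cfOuter, cfOuter_nil_right]
  unfold cmp_fishburn cmp_fishburn_alt
  have hAmB : ∀ x ∈ A.filter (fun x => !B.contains x), x ∈ pref :=
    fun x hx => hA x (List.mem_of_mem_filter hx)
  have hBmA : ∀ x ∈ B.filter (fun x => !A.contains x), x ∈ pref :=
    fun x hx => hB x (List.mem_of_mem_filter hx)
  dsimp only
  rw [cond_eq pref _ _ hAmB hB, cond_eq pref _ _ hA hBmA]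
  cases h1 : (!(A.filter (fun x => !B.contains x)).isEmpty && !B.isEmpty &&
      cfMaxVal (cfRank pref) (A.filter (fun x => !B.contains x)) > cfMinVal (cfRank pref) B) <;>
    cases h2 : (!A.isEmpty && !(B.filter (fun x => !A.contains x)).isEmpty &&
      cfMaxVal (cfRank pref) A > cfMinVal (cfRank pref) (B.filter (fun x => !A.contains x))) <;>
    simp
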